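-- pv_equiv track=rewrite | github.com/galois-search/Nidhi_Prabhu | step2_seq_corre - Copy.py | simplify_complex_powers
-- ===== SOURCE A (Python) =====
-- def simplify_complex_powers(powers):
--     results = {"real": 0, "imaginary": 0}
--     for p in powers:
--         remainder = p % 4
--         if remainder == 0:
--             results["real"] += 1
--         elif remainder == 1:
--             results["imaginary"] += 1
--         elif remainder == 2:
--             results["real"] -= 1
--         elif remainder == 3:
--             results["imaginary"] -= 1
--     r = results["real"]
--     im = results["imaginary"]
--     output = []
--     if r != 0: output.append(f"{r}")
--     if im != 0: output.append(f"{im}i")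
--     return " + ".join(output) if output else "0"
-- ===== SOURCE B (Python) =====
-- _I_POW = ((1, 0), (0, 1), (-1, 0), (0, -1))  # i**k for k = 0..3 as (re, im)
--
-- def simplify_complex_powers(powers):
--     # Divide-and-conquer: sum the complex values i**p pairwise; each leaf
--     # looks i**p up in a fixed table indexed by p % 4.
--     def isum(xs):
--         if not xs:
--             return (0, 0)
--         if len(xs) == 1:
--             return _I_POW[xs[0] % 4]
--         mid = len(xs) // 2
--         a = isum(xs[:mid])
--         b = isum(xs[mid:])
--         return (a[0] + b[0], a[1] + b[1])
--     r, im = isum(powers)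
--     output = []
--     if r != 0: output.append(f"{r}")
--     if im != 0: output.append(f"{im}i")
--     return " + ".join(output) if output else "0"
-- ===== Notes on version B (the rewrite author's own statement) =====
-- stated objective: alternative
-- what changed: Replaces A's incremental dict-updating if/elif classification loop with a divide-and-conquer recursion that sums the complex values i**p pairwise, each leaf obtained by a fixed 4-entry table lookup indexed by p % 4; the formatting tail is unchanged.
import Mathlib
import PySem

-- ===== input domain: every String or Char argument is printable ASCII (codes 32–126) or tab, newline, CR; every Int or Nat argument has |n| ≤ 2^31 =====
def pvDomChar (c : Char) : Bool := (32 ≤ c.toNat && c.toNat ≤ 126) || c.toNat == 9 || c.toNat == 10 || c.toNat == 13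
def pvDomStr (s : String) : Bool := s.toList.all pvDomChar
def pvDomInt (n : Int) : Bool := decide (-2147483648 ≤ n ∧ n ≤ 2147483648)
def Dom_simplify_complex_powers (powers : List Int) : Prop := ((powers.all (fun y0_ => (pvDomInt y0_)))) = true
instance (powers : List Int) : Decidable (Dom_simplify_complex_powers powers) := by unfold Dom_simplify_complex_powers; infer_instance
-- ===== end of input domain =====

-- B replaces A's incremental dict-updating if/elif classification loop with a divide-and-conquer
-- recursion summing the complex values i**p pairwise, each leaf a fixed table lookup by p % 4
-- (alternative decomposition, same result; formatting tail unchanged).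

-- ===== PORT A =====
def simplify_complex_powers (powers : List Int) : String :=
  let results : PySem.Dict String Int := PySem.Dict.ofList [("real", 0), ("imaginary", 0)]
  let results := powers.foldl (fun (results : PySem.Dict String Int) p =>
    let remainder := PySem.Int.mod p 4
    if remainder = 0 then results.modify "real" 0 (· + 1)
    else if remainder = 1 then results.modify "imaginary" 0 (· + 1)
    else if remainder = 2 then results.modify "real" 0 (· - 1)
    else if remainder = 3 then results.modify "imaginary" 0 (· - 1)
    else results) results
  let r := results.getD "real" 0
  let im := results.getD "imaginary" 0
  let output : List String := []
  let output := if r ≠ 0 then output ++ [PySem.Int.toStr r] else output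
  let output := if im ≠ 0 then output ++ [PySem.Int.toStr im ++ "i"] else output
  if output ≠ [] then PySem.Str.join " + " output else "0"

-- ===== PORT B =====
-- the module-level table _I_POW = ((1,0),(0,1),(-1,0),(0,-1))
def pvIPow : List (Int × Int) := [(1, 0), (0, 1), (-1, 0), (0, -1)]

-- Source B's inner divide-and-conquer helper isum; _I_POW[xs[0] % 4] never raises for ints
-- (0 ≤ p % 4 < 4), so the none branch below is unreachable.
def pvIsum (xs : List Int) : Int × Int :=
  if xs = [] then (0, 0)
  else if xs.length = 1 then
    match PySem.List.pyGet? pvIPow (PySem.Int.mod ((PySem.List.pyGet? xs 0).getD 0) 4) with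
    | some c => c
    | none => (0, 0)   -- unreachable: p % 4 ∈ {0,1,2,3}
  else
    let mid : Int := PySem.Int.floordiv (xs.length : Int) 2
    let a := pvIsum (PySem.List.slice xs none (some mid))
    let b := pvIsum (PySem.List.slice xs (some mid) none)
    (a.1 + b.1, a.2 + b.2)
termination_by xs.length
decreasing_by
  · rename_i h1 h2
    rw [show (PySem.Int.floordiv (xs.length : Int) 2) = ((xs.length / 2 : Nat) : Int) from
          PySem.Int.floordiv_natCast xs.length 2,
        PySem.List.slice_to_natCast]
    have hlen : 2 ≤ xs.length := by
      cases xs with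
      | nil => simp at h1
      | cons x t => cases t with
        | nil => simp at h2
        | cons y u => simp
    simp [List.length_take]; omega
  · rename_i h1 h2
    rw [show (PySem.Int.floordiv (xs.length : Int) 2) = ((xs.length / 2 : Nat) : Int) from
          PySem.Int.floordiv_natCast xs.length 2,
        PySem.List.slice_from_natCast]
    have hlen : 2 ≤ xs.length := by
      cases xs with
      | nil => simp at h1
      | cons x t => cases t with
        | nil => simp at h2
        | cons y u => simp
    simp [List.length_drop]; omega

def simplify_complex_powers_alt (powers : List Int) : String :=
  let s := pvIsum powers
  let r := s.1
  let im := s.2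
  let output : List String := []
  let output := if r ≠ 0 then output ++ [PySem.Int.toStr r] else output
  let output := if im ≠ 0 then output ++ [PySem.Int.toStr im ++ "i"] else output
  if output ≠ [] then PySem.Str.join " + " output else "0"

-- ===== PRECONDITION & SPEC =====
def Spec_simplify_complex_powers (powers : List Int) (out : String) : Prop := out = simplify_complex_powers_alt powers
instance (powers : List Int) (out : String) : Decidable (Spec_simplify_complex_powers powers out) := by unfold Spec_simplify_complex_powers; infer_instance

-- ===== CLAIM (what is proved, stated in full; the proofs are below) =====
def Claim_equal_simplify_complex_powers : Prop := ∀ (powers : List Int), Dom_simplify_complex_powers powers → Spec_simplify_complex_powers powers (simplify_complex_powers powers)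

-- ===== LEMMAS AND PROOFS =====

-- the real/imaginary contribution of one power
def pvCRe (p : Int) : Int :=
  if PySem.Int.mod p 4 = 0 then 1 else if PySem.Int.mod p 4 = 2 then -1 else 0
def pvCIm (p : Int) : Int :=
  if PySem.Int.mod p 4 = 1 then 1 else if PySem.Int.mod p 4 = 3 then -1 else 0

-- B's divide-and-conquer computes the sums of the per-element contributions.
theorem pvIsum_eq (xs : List Int) :
    pvIsum xs = ((xs.map pvCRe).sum, (xs.map pvCIm).sum) := by
  by_cases h1 : xs = []
  · subst h1; simp [pvIsum]
  by_cases h2 : xs.length = 1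
  · obtain ⟨p, hp⟩ : ∃ p, xs = [p] := by
      cases xs with
      | nil => simp at h1
      | cons x t => cases t with
        | nil => exact ⟨x, rfl⟩
        | cons y u => simp at h2
    subst hp
    have h0 : 0 ≤ PySem.Int.mod p 4 := PySem.Int.mod_nonneg p (by norm_num)
    have h4 : PySem.Int.mod p 4 < 4 := PySem.Int.mod_lt p (by norm_num)
    have hget : (PySem.List.pyGet? [p] 0).getD 0 = p := by
      simp [PySem.List.pyGet?, PySem.List.pyIdx?]
    have hcases : PySem.Int.mod p 4 = 0 ∨ PySem.Int.mod p 4 = 1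
        ∨ PySem.Int.mod p 4 = 2 ∨ PySem.Int.mod p 4 = 3 := by omega
    rcases hcases with hm|hm|hm|hm <;> rw [pvIsum] <;>
      simp only [hget, hm] <;>
      norm_num [pvIPow, PySem.List.pyGet?, PySem.List.pyIdx?] <;>
      simp only [pvCRe, pvCIm, hm] <;>
      first | rfl | norm_num
  · have hlen : 2 ≤ xs.length := by
      cases xs with
      | nil => simp at h1
      | cons x t => cases t with
        | nil => simp at h2
        | cons y u => simp
    have iha := pvIsum_eq (xs.take (xs.length / 2))
    have ihb := pvIsum_eq (xs.drop (xs.length / 2))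
    have hmid : PySem.Int.floordiv (xs.length : Int) 2 = ((xs.length / 2 : Nat) : Int) :=
      PySem.Int.floordiv_natCast xs.length 2
    have hs1 : PySem.List.slice xs none (some (PySem.Int.floordiv (xs.length : Int) 2))
        = xs.take (xs.length / 2) := by rw [hmid, PySem.List.slice_to_natCast]
    have hs2 : PySem.List.slice xs (some (PySem.Int.floordiv (xs.length : Int) 2)) none
        = xs.drop (xs.length / 2) := by rw [hmid, PySem.List.slice_from_natCast]
    rw [pvIsum]
    simp only [if_neg h1, if_neg h2, hs1, hs2, iha, ihb]
    conv_rhs => rw [show xs = xs.take (xs.length / 2) ++ xs.drop (xs.length / 2) from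
      (List.take_append_drop _ _).symm]
    simp
termination_by xs.length
decreasing_by
  · simp [List.length_take]; omega
  · simp [List.length_drop]; omega

-- A's loop body as a named step function
def pvStep (results : PySem.Dict String Int) (p : Int) : PySem.Dict String Int :=
  let remainder := PySem.Int.mod p 4
  if remainder = 0 then results.modify "real" 0 (· + 1)
  else if remainder = 1 then results.modify "imaginary" 0 (· + 1)
  else if remainder = 2 then results.modify "real" 0 (· - 1)
  else if remainder = 3 then results.modify "imaginary" 0 (· - 1)
  else results

-- Loop invariant: A's dict entries are the initial values plus the contribution sums.
theorem pvLoop (l : List Int) (d : PySem.Dict String Int) :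
    (l.foldl pvStep d).getD "real" 0 = d.getD "real" 0 + (l.map pvCRe).sum
    ∧ (l.foldl pvStep d).getD "imaginary" 0 = d.getD "imaginary" 0 + (l.map pvCIm).sum := by
  induction l generalizing d with
  | nil => simp
  | cons p t ih =>
    have h0 : 0 ≤ PySem.Int.mod p 4 := PySem.Int.mod_nonneg p (by norm_num)
    have h4 : PySem.Int.mod p 4 < 4 := PySem.Int.mod_lt p (by norm_num)
    have hne : ("imaginary" : String) ≠ "real" := by decide
    have hne' : ("real" : String) ≠ "imaginary" := by decide
    have hcases : PySem.Int.mod p 4 = 0 ∨ PySem.Int.mod p 4 = 1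
        ∨ PySem.Int.mod p 4 = 2 ∨ PySem.Int.mod p 4 = 3 := by omega
    rw [List.foldl_cons]
    rcases hcases with hm|hm|hm|hm
    · have hre : pvCRe p = 1 := by simp only [pvCRe, hm]; norm_num
      have him : pvCIm p = 0 := by simp only [pvCIm, hm]; norm_num
      have hstep : pvStep d p = d.modify "real" 0 (· + 1) := by
        simp only [pvStep]; rw [if_pos hm]
      obtain ⟨ih1, ih2⟩ := ih (d.modify "real" 0 (· + 1))
      rw [hstep]
      refine ⟨?_, ?_⟩
      · rw [ih1, PySem.Dict.getD_modify_self]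
        simp [hre]; ring
      · rw [ih2, PySem.Dict.getD_modify_of_ne _ _ _ hne]
        simp [him]
    · have hre : pvCRe p = 0 := by simp only [pvCRe, hm]; norm_num
      have him : pvCIm p = 1 := by simp only [pvCIm, hm]; norm_num
      have hstep : pvStep d p = d.modify "imaginary" 0 (· + 1) := by
        simp only [pvStep]; rw [if_neg (by omega), if_pos hm]
      obtain ⟨ih1, ih2⟩ := ih (d.modify "imaginary" 0 (· + 1))
      rw [hstep]
      refine ⟨?_, ?_⟩
      · rw [ih1, PySem.Dict.getD_modify_of_ne _ _ _ hne']
        simp [hre]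
      · rw [ih2, PySem.Dict.getD_modify_self]
        simp [him]; ring
    · have hre : pvCRe p = -1 := by simp only [pvCRe, hm]; norm_num
      have him : pvCIm p = 0 := by simp only [pvCIm, hm]; norm_num
      have hstep : pvStep d p = d.modify "real" 0 (· - 1) := by
        simp only [pvStep]; rw [if_neg (by omega), if_neg (by omega), if_pos hm]
      obtain ⟨ih1, ih2⟩ := ih (d.modify "real" 0 (· - 1))
      rw [hstep]
      refine ⟨?_, ?_⟩
      · rw [ih1, PySem.Dict.getD_modify_self]
        simp [hre]; ring
      · rw [ih2, PySem.Dict.getD_modify_of_ne _ _ _ hne]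
        simp [him]
    · have hre : pvCRe p = 0 := by simp only [pvCRe, hm]; norm_num
      have him : pvCIm p = -1 := by simp only [pvCIm, hm]; norm_num
      have hstep : pvStep d p = d.modify "imaginary" 0 (· - 1) := by
        simp only [pvStep]; rw [if_neg (by omega), if_neg (by omega), if_neg (by omega), if_pos hm]
      obtain ⟨ih1, ih2⟩ := ih (d.modify "imaginary" 0 (· - 1))
      rw [hstep]
      refine ⟨?_, ?_⟩
      · rw [ih1, PySem.Dict.getD_modify_of_ne _ _ _ hne']
        simp [hre]
      · rw [ih2, PySem.Dict.getD_modify_self]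
        simp [him]; ring

-- ===== VERDICT (by name: the statement is the Claim_ definition above) =====
theorem simplify_complex_powers_spec : Claim_equal_simplify_complex_powers := by
  intro powers _
  unfold Spec_simplify_complex_powers simplify_complex_powers simplify_complex_powers_alt
  obtain ⟨h1, h2⟩ := pvLoop powers (PySem.Dict.ofList [("real", 0), ("imaginary", 0)])
  have e1 : (PySem.Dict.ofList [("real", (0:Int)), ("imaginary", 0)]).getD "real" 0 = 0 := by decide
  have e2 : (PySem.Dict.ofList [("real", (0:Int)), ("imaginary", 0)]).getD "imaginary" 0 = 0 := by decide
  rw [e1, zero_add] at h1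
  rw [e2, zero_add] at h2
  simp only [show (fun (results : PySem.Dict String Int) p =>
    let remainder := PySem.Int.mod p 4
    if remainder = 0 then results.modify "real" 0 (· + 1)
    else if remainder = 1 then results.modify "imaginary" 0 (· + 1)
    else if remainder = 2 then results.modify "real" 0 (· - 1)
    else if remainder = 3 then results.modify "imaginary" 0 (· - 1)
    else results) = pvStep from rfl, h1, h2, pvIsum_eq]
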